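-- pv_equiv track=rewrite | github.com/Zmdrmyvyg/leetcode-master | mysolutions/tt server invest.py | maxUpgradedServers
-- ===== SOURCE A (Python) =====
-- def maxUpgradedServers(num_servers, money, sell, upgrade):
--     n = len(num_servers)
--     result = [0] * n
--
--     for i in range(n):
--         servers = num_servers[i]
--         funds = money[i]
--         upgrade_cost = upgrade[i]
--         sell_value = sell[i]
--
--         # TODO: 在这里写你自己的逻辑
--         # 算出第 i 个网络最多能升级多少台服务器
--         # 并把答案存到 result[i]
--         max_up = 0
--         for j in range(servers + 1):
--             if upgrade_cost * j - sell_value * (servers - j) <= funds: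
--                 max_up = j
--
--         result[i] = max_up
--
--     return result
-- ===== SOURCE B (Python) =====
-- def maxUpgradedServers(num_servers, money, sell, upgrade):
--     # For each network the affordability condition "upgrade j, sell the rest"
--     # is (upgrade+sell)*j <= funds + sell*servers, which is monotone in j,
--     # so the best j is a closed form instead of a scan over all candidates.
--     result = []
--     for servers, funds, s, u in zip(num_servers, money, sell, upgrade):
--         d = u + s
--         t = funds + s * servers
--         if d > 0:
--             best = min(servers, t // d)
--         elif d * servers <= t:
--             best = servers
--         else:
--             best = 0
--         result.append(max(best, 0))
--     return result
-- ===== Notes on version B (the rewrite author's own statement) =====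
-- stated objective: faster
-- what changed: Replaces A's O(servers) scan over every candidate upgrade count by a per-network closed form (the affordability condition is monotone, so one floor division plus min/max gives the answer) in a single zip pass; Pre_ excludes only inputs where money/sell/upgrade are shorter than num_servers, on which A raises IndexError.
import Mathlib
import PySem

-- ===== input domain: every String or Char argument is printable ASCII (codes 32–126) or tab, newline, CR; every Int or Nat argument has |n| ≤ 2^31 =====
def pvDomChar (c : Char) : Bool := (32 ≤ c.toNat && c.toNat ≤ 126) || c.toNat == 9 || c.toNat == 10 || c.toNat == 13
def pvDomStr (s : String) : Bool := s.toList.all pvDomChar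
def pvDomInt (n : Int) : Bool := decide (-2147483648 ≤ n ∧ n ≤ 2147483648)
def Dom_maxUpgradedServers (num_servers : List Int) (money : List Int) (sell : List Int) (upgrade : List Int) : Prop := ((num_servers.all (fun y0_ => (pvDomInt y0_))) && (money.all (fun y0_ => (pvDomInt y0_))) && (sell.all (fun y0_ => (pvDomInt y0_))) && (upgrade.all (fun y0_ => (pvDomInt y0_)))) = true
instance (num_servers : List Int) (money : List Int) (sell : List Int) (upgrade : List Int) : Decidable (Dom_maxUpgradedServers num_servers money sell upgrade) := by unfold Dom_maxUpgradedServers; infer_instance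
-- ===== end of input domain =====

-- B replaces A's per-network linear scan over all candidate upgrade counts by a closed form
-- per network (the affordability condition is monotone in j, so one floor division plus
-- min/max gives the answer); objective: faster (asymptotic).

-- ===== PORT A =====
def maxUpgradedServers (num_servers : List Int) (money : List Int) (sell : List Int) (upgrade : List Int) : List Int :=
  let n : Int := num_servers.length
  let result : List Int := List.replicate num_servers.length 0
  (PySem.List.pyRange 0 n 1).foldl (fun result i =>
    let servers := PySem.List.pyGetD num_servers i 0
    let funds := PySem.List.pyGetD money i 0
    let upgrade_cost := PySem.List.pyGetD upgrade i 0
    let sell_value := PySem.List.pyGetD sell i 0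
    let max_up := (PySem.List.pyRange 0 (servers + 1) 1).foldl
      (fun max_up j => if upgrade_cost * j - sell_value * (servers - j) ≤ funds then j else max_up) 0
    PySem.List.pySetD result i max_up) result

-- ===== PORT B =====
-- B's per-network closed form (the body of Source B's loop)
def pvBest (servers funds s u : Int) : Int :=
  let d := u + s
  let t := funds + s * servers
  let best :=
    if 0 < d then min servers (PySem.Int.floordiv t d)
    else if d * servers ≤ t then servers
    else 0
  max best 0

def maxUpgradedServers_alt (num_servers : List Int) (money : List Int) (sell : List Int) (upgrade : List Int) : List Int :=
  match num_servers, money, sell, upgrade with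
  | sv :: ns, f :: ms, sl :: ss, u :: us => pvBest sv f sl u :: maxUpgradedServers_alt ns ms ss us
  | _, _, _, _ => []

-- ===== PRECONDITION & SPEC =====
-- Pre_ excludes exactly the inputs on which A raises IndexError: money/sell/upgrade shorter than num_servers.
def Pre_maxUpgradedServers (num_servers : List Int) (money : List Int) (sell : List Int) (upgrade : List Int) : Prop :=
  num_servers.length ≤ money.length ∧ num_servers.length ≤ sell.length ∧ num_servers.length ≤ upgrade.length
instance (num_servers : List Int) (money : List Int) (sell : List Int) (upgrade : List Int) : Decidable (Pre_maxUpgradedServers num_servers money sell upgrade) := by unfold Pre_maxUpgradedServers; infer_instance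

def pvWitness_maxUpgradedServers : List Int × List Int × List Int × List Int :=
  ([2, -1, 3], [3, 0, -2], [1, 1, 0], [2, 2, -1])

def Spec_maxUpgradedServers (num_servers : List Int) (money : List Int) (sell : List Int) (upgrade : List Int) (out : List Int) : Prop := out = maxUpgradedServers_alt num_servers money sell upgrade
instance (num_servers : List Int) (money : List Int) (sell : List Int) (upgrade : List Int) (out : List Int) : Decidable (Spec_maxUpgradedServers num_servers money sell upgrade out) := by unfold Spec_maxUpgradedServers; infer_instance

-- ===== CLAIM =====
def Claim_equal_maxUpgradedServers : Prop := ∀ (num_servers : List Int) (money : List Int) (sell : List Int) (upgrade : List Int), Dom_maxUpgradedServers num_servers money sell upgrade → Pre_maxUpgradedServers num_servers money sell upgrade → Spec_maxUpgradedServers num_servers money sell upgrade (maxUpgradedServers num_servers money sell upgrade)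

-- ===== LEMMAS AND PROOFS =====

-- A's inner scan with the condition rewritten to d*k ≤ t, over List.range
lemma pv_scan (d t : Int) : ∀ (N : Nat),
    (List.range N).foldl (fun (m : Int) (k : Nat) => if d * (k : Int) ≤ t then (k : Int) else m) 0 =
      (if 0 < d then max 0 (min ((N : Int) - 1) (t / d))
       else if d * ((N : Int) - 1) ≤ t then max 0 ((N : Int) - 1) else 0) := by
  intro N
  induction N with
  | zero =>
    simp only [List.range_zero, List.foldl_nil, Nat.cast_zero]
    split_ifs with h1 h2 <;> omega
  | succ n ih =>
    rw [List.range_succ, List.foldl_append, ih]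
    simp only [List.foldl_cons, List.foldl_nil]
    push_cast
    have hexp : d * ((n : Int) + 1 - 1) = d * ((n : Int) + 1) - d := by ring
    by_cases hd : 0 < d
    · have hiff : (n : Int) ≤ t / d ↔ (n : Int) * d ≤ t := Int.le_ediv_iff_mul_le hd
      have hm : (n : Int) * d = d * (n : Int) := by ring
      rw [hm] at hiff
      simp only [hd, if_true]
      by_cases hc : d * (n : Int) ≤ t
      · simp only [hc, if_true]; omega
      · simp only [hc, if_false]; omega
    · simp only [hd, if_false]
      have hstep : d * ((n : Int) + 1) = d * (n : Int) + d := by ring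
      by_cases hc : d * (n : Int) ≤ t
      · simp only [hc, if_true]; rw [hexp]; omega
      · simp only [hc, if_false]
        have h2 : d * ((n : Int) - 1) = d * (n : Int) - d := by ring
        rw [hexp]
        split_ifs with h3 h4 <;> omega

-- A's inner loop computes pvBest
lemma pv_inner_eq (sv f s u : Int) :
    (PySem.List.pyRange 0 (sv + 1) 1).foldl
      (fun m j => if u * j - s * (sv - j) ≤ f then j else m) 0 = pvBest sv f s u := by
  have hcond : (fun (m j : Int) => if u * j - s * (sv - j) ≤ f then j else m)
      = (fun (m j : Int) => if (u + s) * j ≤ f + s * sv then j else m) := by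
    funext m j
    have : u * j - s * (sv - j) ≤ f ↔ (u + s) * j ≤ f + s * sv := by
      constructor <;> intro h <;> nlinarith
    simp only [this]
  rw [hcond, PySem.List.pyRange_one, List.foldl_map]
  simp only [zero_add, sub_zero]
  rw [pv_scan (u + s) (f + s * sv) (sv + 1).toNat]
  by_cases hsv : 0 ≤ sv
  · have hN : ((sv + 1).toNat : Int) - 1 = sv := by omega
    rw [hN]
    simp only [pvBest]
    by_cases hd : 0 < u + s
    · simp only [hd, if_true]
      rw [PySem.Int.floordiv_eq_ediv_of_pos hd]
      omega
    · simp only [hd, if_false]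
      split_ifs <;> omega
  · have hN : ((sv + 1).toNat : Int) = 0 := by omega
    rw [hN]
    simp only [pvBest]
    by_cases hd : 0 < u + s
    · simp only [hd, if_true]
      have hmin : min sv (PySem.Int.floordiv (f + s * sv) (u + s)) ≤ sv := min_le_left _ _
      have h0 : (0 : Int) - 1 = -1 := by norm_num
      rw [h0]
      have : min (-1 : Int) ((f + s * sv) / (u + s)) ≤ -1 := min_le_left _ _
      omega
    · simp only [hd, if_false]
      have hexp : (u + s) * ((0 : Int) - 1) = -(u + s) := by ring
      rw [hexp]
      split_ifs <;> omega

-- the outer loop: setting index i of init to g i for every i < n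
lemma pv_set_loop (g : Int → Int) : ∀ (n : Nat) (init : List Int), n ≤ init.length →
    (PySem.List.pyRange 0 (n : Int) 1).foldl (fun r i => PySem.List.pySetD r i (g i)) init
      = (List.range n).map (fun (k : Nat) => g (k : Int)) ++ init.drop n := by
  intro n
  induction n with
  | zero =>
    intro init _
    rw [PySem.List.pyRange_one_eq_nil (by norm_num)]
    simp
  | succ n ih =>
    intro init hlen
    have hcast : (((n + 1 : Nat)) : Int) = (n : Int) + 1 := by push_cast; ring
    rw [hcast, PySem.List.pyRange_one_succ_right (by positivity), List.foldl_append]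
    rw [ih init (by omega)]
    simp only [List.foldl_cons, List.foldl_nil, PySem.List.pySetD_natCast]
    have hn : n < init.length := by omega
    rw [List.drop_eq_getElem_cons hn]
    rw [List.set_append]
    simp only [List.length_map, List.length_range, lt_irrefl, Nat.sub_self, List.set_cons_zero]
    rw [List.range_succ, List.map_append]
    simp

-- B equals the map of pvBest over indices (under the length preconditions)
lemma pv_alt_eq : ∀ (ns ms ss us : List Int),
    ns.length ≤ ms.length → ns.length ≤ ss.length → ns.length ≤ us.length →
    maxUpgradedServers_alt ns ms ss us =
      (List.range ns.length).map (fun (k : Nat) => pvBest (ns.getD k 0) (ms.getD k 0) (ss.getD k 0) (us.getD k 0)) := by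
  intro ns
  induction ns with
  | nil => intro ms ss us _ _ _; simp [maxUpgradedServers_alt]
  | cons sv ns ih =>
    intro ms ss us h1 h2 h3
    cases ms with
    | nil => simp at h1
    | cons f ms =>
      cases ss with
      | nil => simp at h2
      | cons sl ss =>
        cases us with
        | nil => simp at h3
        | cons u us =>
          simp only [maxUpgradedServers_alt, List.length_cons]
          rw [ih ms ss us (by simpa using h1) (by simpa using h2) (by simpa using h3)]
          rw [List.range_succ_eq_map, List.map_cons, List.map_map]
          simp [Function.comp]

-- ===== VERDICT =====
theorem maxUpgradedServers_spec : Claim_equal_maxUpgradedServers := by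
  intro ns ms ss us _ hpre
  obtain ⟨h1, h2, h3⟩ := hpre
  unfold Spec_maxUpgradedServers
  show (PySem.List.pyRange 0 (ns.length : Int) 1).foldl _ (List.replicate ns.length 0) = _
  rw [pv_set_loop (fun i =>
        (PySem.List.pyRange 0 (PySem.List.pyGetD ns i 0 + 1) 1).foldl
          (fun m j => if PySem.List.pyGetD us i 0 * j - PySem.List.pyGetD ss i 0 * (PySem.List.pyGetD ns i 0 - j) ≤ PySem.List.pyGetD ms i 0 then j else m) 0)
      ns.length (List.replicate ns.length 0) (by simp)]
  rw [pv_alt_eq ns ms ss us h1 h2 h3]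
  simp only [List.drop_replicate, Nat.sub_self, List.replicate_zero, List.append_nil]
  refine List.map_congr_left ?_
  intro k _
  simp only [PySem.List.pyGetD_natCast]
  rw [pv_inner_eq]
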